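-- pv_equiv track=rewrite | github.com/Russel-hunho/code_codingtest | baekjoon/동적 계획법 1/baekjoon_9461_파도반 수열.py | trigonal
-- ===== SOURCE A (Python) =====
-- def trigonal(N):
--     D = [0,1,1,1,2,2,3,4,5,7]
--     if N <= 9:
--         return D[N]
--     else:
--         for i in range(10,N+1):
--             D.append(D[-1]+D[-5])
--         return D[N]
-- ===== SOURCE B (Python) =====
-- I5 = [[1, 0, 0, 0, 0],
--       [0, 1, 0, 0, 0],
--       [0, 0, 1, 0, 0],
--       [0, 0, 0, 1, 0],
--       [0, 0, 0, 0, 1]]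
--
-- # companion matrix of a(n+1) = a(n) + a(n-4) acting on (a(n-4),...,a(n))
-- T5 = [[0, 1, 0, 0, 0],
--       [0, 0, 1, 0, 0],
--       [0, 0, 0, 1, 0],
--       [0, 0, 0, 0, 1],
--       [1, 0, 0, 0, 1]]
--
--
-- def dot(r, c):
--     return sum(a * b for a, b in zip(r, c))
--
--
-- def mat_mul(X, Y):
--     cols = list(zip(*Y))
--     return [[dot(row, col) for col in cols] for row in X]
--
--
-- def mat_pow(M, e):
--     R = I5
--     while e > 0:
--         if e & 1:
--             R = mat_mul(R, M)
--         M = mat_mul(M, M)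
--         e >>= 1
--     return R
--
--
-- def trigonal(N):
--     base = [0, 1, 1, 1, 2, 2, 3, 4, 5, 7]
--     if N < 10:
--         return base[N]
--     P = mat_pow(T5, N - 9)
--     return dot(P[4], [2, 3, 4, 5, 7])
-- ===== Notes on version B (the rewrite author's own statement) =====
-- stated objective: faster
-- what changed: Replaces A's linear list-building loop over the recurrence a(n)=a(n-1)+a(n-5) with binary exponentiation of the 5x5 companion matrix applied to the seed vector.
import Mathlib
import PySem

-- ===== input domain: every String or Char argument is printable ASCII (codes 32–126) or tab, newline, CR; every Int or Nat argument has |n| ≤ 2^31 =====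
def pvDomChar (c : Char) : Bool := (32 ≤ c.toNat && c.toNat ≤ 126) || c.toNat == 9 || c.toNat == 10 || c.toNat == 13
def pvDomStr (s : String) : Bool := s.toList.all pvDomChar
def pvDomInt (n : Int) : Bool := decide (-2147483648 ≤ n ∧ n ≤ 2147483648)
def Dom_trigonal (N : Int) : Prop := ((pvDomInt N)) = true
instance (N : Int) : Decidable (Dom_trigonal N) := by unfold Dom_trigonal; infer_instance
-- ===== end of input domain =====

-- B replaces A's O(N) list-building loop by binary exponentiation of the 5x5 companion
-- matrix of a(n)=a(n-1)+a(n-5) (objective: faster, O(log N) recurrence steps).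

-- ===== PORT A =====
-- D[i] on Python's list, kept as a dynamic Array as Python does (append = push):
-- the same index rule as PySem.List.pyGet? (negative from the end, none = IndexError)
def pyAGet? (a : Array Int) (i : Int) : Option Int :=
  (PySem.List.pyIdx? a.size i).bind fun k => a[k]?

def trigonal (N : Int) : Int :=
  let D : Array Int := #[0, 1, 1, 1, 2, 2, 3, 4, 5, 7]
  if N ≤ 9 then (pyAGet? D N).getD 0             -- D[N]; never none on Pre_ (−10 ≤ N)
  else
    let D' := (PySem.List.pyRange 10 (N + 1) 1).foldl
      (fun D _ => D.push ((pyAGet? D (-1)).getD 0 + (pyAGet? D (-5)).getD 0)) D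
    (pyAGet? D' N).getD 0                        -- in range: D' has size N+1 here

-- ===== PORT B =====
-- dot(r, c) = sum(a*b for a, b in zip(r, c))
def pvDot (r c : List Int) : Int := ((r.zip c).map (fun p => p.1 * p.2)).sum

-- list(zip(*Y)): zipWith cons truncates to the shortest row exactly like Python's zip
def pvTranspose : List (List Int) → List (List Int)
  | [] => []
  | [r] => r.map (fun x => [x])
  | r :: rs => List.zipWith List.cons r (pvTranspose rs)

def pvMatMul (X Y : List (List Int)) : List (List Int) :=
  let cols := pvTranspose Y
  X.map (fun row => cols.map (fun col => pvDot row col))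

def pvI5 : List (List Int) :=
  [[1,0,0,0,0],[0,1,0,0,0],[0,0,1,0,0],[0,0,0,1,0],[0,0,0,0,1]]

def pvT5 : List (List Int) :=
  [[0,1,0,0,0],[0,0,1,0,0],[0,0,0,1,0],[0,0,0,0,1],[1,0,0,0,1]]

-- mat_pow's while-loop (R accumulator, square M, halve e)
def pvMatPow (R M : List (List Int)) (e : Nat) : List (List Int) :=
  if h : e = 0 then R
  else pvMatPow (if e % 2 = 1 then pvMatMul R M else R) (pvMatMul M M) (e / 2)
  termination_by e
  decreasing_by exact Nat.div_lt_self (Nat.pos_of_ne_zero h) one_lt_two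

def trigonal_alt (N : Int) : Int :=
  let base : List Int := [0, 1, 1, 1, 2, 2, 3, 4, 5, 7]
  if N < 10 then (PySem.List.pyGet? base N).getD 0   -- base[N]; never none on Pre_
  else
    let P := pvMatPow pvI5 pvT5 (N - 9).toNat
    pvDot ((PySem.List.pyGet? P 4).getD []) [2, 3, 4, 5, 7]   -- dot(P[4], seed)

-- ===== PRECONDITION & SPEC =====
-- A (and B) raise IndexError for N < -10 (base[N] out of range); Pre_ excludes exactly those.
def Pre_trigonal (N : Int) : Prop := -10 ≤ N
instance (N : Int) : Decidable (Pre_trigonal N) := by unfold Pre_trigonal; infer_instance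
def pvWitness_trigonal : Int := 12

def Spec_trigonal (N : Int) (out : Int) : Prop := out = trigonal_alt N
instance (N : Int) (out : Int) : Decidable (Spec_trigonal N out) := by unfold Spec_trigonal; infer_instance

-- ===== CLAIM (what is proved, stated in full; the proofs are below) =====
def Claim_equal_trigonal : Prop := ∀ (N : Int), Dom_trigonal N → Pre_trigonal N → Spec_trigonal N (trigonal N)

-- ===== LEMMAS AND PROOFS =====

-- the mathematical sequence
def pent : Nat → Int
  | 0 => 0 | 1 => 1 | 2 => 1 | 3 => 1 | 4 => 2
  | n + 5 => pent (n + 4) + pent n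

theorem pent_rec (m : Nat) (h : 5 ≤ m) : pent m = pent (m - 1) + pent (m - 5) := by
  obtain ⟨n, rfl⟩ := Nat.exists_eq_add_of_le h
  have : 5 + n = n + 5 := by omega
  rw [this]
  show pent (n + 5) = _
  rw [pent, show n + 5 - 1 = n + 4 from by omega, show n + 5 - 5 = n from by omega]

-- ---- A side ----

theorem pyAGet?_toList (a : Array Int) (i : Int) :
    pyAGet? a i = PySem.List.pyGet? a.toList i := by
  simp [pyAGet?, PySem.List.pyGet?]

theorem push_toList (D : Array Int) :
    (D.push ((pyAGet? D (-1)).getD 0 + (pyAGet? D (-5)).getD 0)).toList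
      = D.toList ++ [(PySem.List.pyGet? D.toList (-1)).getD 0 +
                     (PySem.List.pyGet? D.toList (-5)).getD 0] := by
  simp [Array.toList_push, pyAGet?_toList]

theorem foldl_arr (l : List Int) (D : Array Int) :
    (l.foldl (fun D _ => D.push ((pyAGet? D (-1)).getD 0 + (pyAGet? D (-5)).getD 0)) D).toList
      = l.foldl (fun L _ =>
          L ++ [(PySem.List.pyGet? L (-1)).getD 0 + (PySem.List.pyGet? L (-5)).getD 0])
          D.toList := by
  induction l generalizing D with
  | nil => rfl
  | cons x xs ih => simp only [List.foldl_cons, ih, push_toList]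

theorem foldl_const_iterate {α β : Type} (l : List α) (f : β → β) (b : β) :
    l.foldl (fun a _ => f a) b = f^[l.length] b := by
  induction l generalizing b with
  | nil => rfl
  | cons x xs ih => simp [List.foldl_cons, ih, Function.iterate_succ_apply]

theorem stepA_map_range (m : Nat) (h : 5 ≤ m) :
    ((List.range m).map pent) ++
      [(PySem.List.pyGet? ((List.range m).map pent) (-1)).getD 0 +
       (PySem.List.pyGet? ((List.range m).map pent) (-5)).getD 0]
      = (List.range (m + 1)).map pent := by
  have hlen : ((List.range m).map pent).length = m := by simp
  rw [PySem.List.pyGet?_neg_ofNat _ 1 (by omega) (by omega),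
      PySem.List.pyGet?_neg_ofNat _ 5 (by omega) (by omega)]
  rw [hlen]
  have h1 : ((List.range m).map pent)[m - 1]? = some (pent (m - 1)) := by
    simp [List.getElem?_map, List.getElem?_range (by omega : m - 1 < m)]
  have h5 : ((List.range m).map pent)[m - 5]? = some (pent (m - 5)) := by
    simp [List.getElem?_map, List.getElem?_range (by omega : m - 5 < m)]
  rw [h1, h5, List.range_succ, List.map_append]
  simp only [List.map_cons, List.map_nil, Option.getD_some]
  rw [← pent_rec m h]

theorem iterate_stepA (k : Nat) :
    (fun D : List Int =>
        D ++ [(PySem.List.pyGet? D (-1)).getD 0 + (PySem.List.pyGet? D (-5)).getD 0])^[k]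
      ((List.range 10).map pent) = (List.range (10 + k)).map pent := by
  induction k with
  | zero => rfl
  | succ k ih =>
      rw [Function.iterate_succ_apply', ih]
      have := stepA_map_range (10 + k) (by omega)
      simpa using this

-- ---- B side ----

def pvMulVec (M : List (List Int)) (v : List Int) : List Int := M.map (fun r => pvDot r v)

def pvWf (M : List (List Int)) : Prop := M.length = 5 ∧ ∀ r ∈ M, r.length = 5

theorem list5 {α : Type} (l : List α) (h : l.length = 5) :
    ∃ a b c d e, l = [a, b, c, d, e] := by
  rcases l with _ | ⟨a, _ | ⟨b, _ | ⟨c, _ | ⟨d, _ | ⟨e, _ | ⟨f, t⟩⟩⟩⟩⟩⟩ <;> simp_all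

theorem wf5 {M : List (List Int)} (h : pvWf M) :
    ∃ r0 r1 r2 r3 r4, M = [r0, r1, r2, r3, r4] ∧
      r0.length = 5 ∧ r1.length = 5 ∧ r2.length = 5 ∧ r3.length = 5 ∧ r4.length = 5 := by
  obtain ⟨r0, r1, r2, r3, r4, rfl⟩ := list5 M h.1
  exact ⟨r0, r1, r2, r3, r4, rfl, h.2 _ (by simp), h.2 _ (by simp), h.2 _ (by simp),
    h.2 _ (by simp), h.2 _ (by simp)⟩

theorem wf_matMul {X Y : List (List Int)} (hX : pvWf X) (hY : pvWf Y) :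
    pvWf (pvMatMul X Y) := by
  obtain ⟨x0, x1, x2, x3, x4, rfl, _, _, _, _, _⟩ := wf5 hX
  obtain ⟨y0, y1, y2, y3, y4, rfl, h0, h1, h2, h3, h4⟩ := wf5 hY
  obtain ⟨_, _, _, _, _, rfl⟩ := list5 y0 h0
  obtain ⟨_, _, _, _, _, rfl⟩ := list5 y1 h1
  obtain ⟨_, _, _, _, _, rfl⟩ := list5 y2 h2
  obtain ⟨_, _, _, _, _, rfl⟩ := list5 y3 h3
  obtain ⟨_, _, _, _, _, rfl⟩ := list5 y4 h4
  refine ⟨rfl, ?_⟩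
  intro r hr
  simp [pvMatMul, pvTranspose] at hr
  rcases hr with rfl | rfl | rfl | rfl | rfl <;> rfl

theorem mulVec_matMul {X Y : List (List Int)} {v : List Int}
    (hX : pvWf X) (hY : pvWf Y) (hv : v.length = 5) :
    pvMulVec (pvMatMul X Y) v = pvMulVec X (pvMulVec Y v) := by
  obtain ⟨x0, x1, x2, x3, x4, rfl, hx0, hx1, hx2, hx3, hx4⟩ := wf5 hX
  obtain ⟨y0, y1, y2, y3, y4, rfl, hy0, hy1, hy2, hy3, hy4⟩ := wf5 hY
  obtain ⟨_, _, _, _, _, rfl⟩ := list5 x0 hx0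
  obtain ⟨_, _, _, _, _, rfl⟩ := list5 x1 hx1
  obtain ⟨_, _, _, _, _, rfl⟩ := list5 x2 hx2
  obtain ⟨_, _, _, _, _, rfl⟩ := list5 x3 hx3
  obtain ⟨_, _, _, _, _, rfl⟩ := list5 x4 hx4
  obtain ⟨_, _, _, _, _, rfl⟩ := list5 y0 hy0
  obtain ⟨_, _, _, _, _, rfl⟩ := list5 y1 hy1
  obtain ⟨_, _, _, _, _, rfl⟩ := list5 y2 hy2
  obtain ⟨_, _, _, _, _, rfl⟩ := list5 y3 hy3
  obtain ⟨_, _, _, _, _, rfl⟩ := list5 y4 hy4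
  obtain ⟨_, _, _, _, _, rfl⟩ := list5 v hv
  simp only [pvMatMul, pvTranspose, pvMulVec, pvDot, List.zipWith, List.map, List.zip,
    List.sum_cons, List.sum_nil]
  refine List.ext_getElem (by simp) ?_
  intro i h1 h2
  simp only [List.length_cons, List.length_nil] at h2
  interval_cases i <;> simp <;> ring

theorem mulVec_length {M : List (List Int)} (hM : pvWf M) (v : List Int) :
    (pvMulVec M v).length = 5 := by simp [pvMulVec, hM.1]

theorem iterate_mulVec_length {M : List (List Int)} (hM : pvWf M) (k : Nat)
    (v : List Int) (hv : v.length = 5) : ((fun w => pvMulVec M w)^[k] v).length = 5 := by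
  induction k generalizing v with
  | zero => simpa
  | succ k ih => rw [Function.iterate_succ_apply]; exact ih _ (mulVec_length hM v)

theorem iterate_sq {M : List (List Int)} (hM : pvWf M) (k : Nat) (v : List Int)
    (hv : v.length = 5) :
    (fun w => pvMulVec (pvMatMul M M) w)^[k] v = (fun w => pvMulVec M w)^[2 * k] v := by
  induction k generalizing v with
  | zero => rfl
  | succ k ih =>
      rw [Function.iterate_succ_apply, ih (pvMulVec (pvMatMul M M) v) ?_]
      · rw [mulVec_matMul hM hM hv]
        have : 2 * (k + 1) = (2 * k) + 1 + 1 := by omega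
        rw [this, Function.iterate_succ_apply, Function.iterate_succ_apply]
      · exact mulVec_length (wf_matMul hM hM) v

theorem pow_act (e : Nat) : ∀ (R M : List (List Int)) (v : List Int),
    pvWf R → pvWf M → v.length = 5 →
    pvMulVec (pvMatPow R M e) v = pvMulVec R ((fun w => pvMulVec M w)^[e] v) := by
  induction e using Nat.strong_induction_on with
  | _ e IH =>
      intro R M v hR hM hv
      rw [pvMatPow]
      by_cases h0 : e = 0
      · simp [h0]
      · rw [dif_neg h0]
        have hR' : pvWf (if e % 2 = 1 then pvMatMul R M else R) := by
          split_ifs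
          · exact wf_matMul hR hM
          · exact hR
        rw [IH (e / 2) (Nat.div_lt_self (Nat.pos_of_ne_zero h0) one_lt_two) _ _ v hR'
          (wf_matMul hM hM) hv]
        rw [iterate_sq hM (e / 2) v hv]
        by_cases hodd : e % 2 = 1
        · rw [if_pos hodd]
          rw [mulVec_matMul hR hM (iterate_mulVec_length hM _ v hv)]
          rw [← Function.iterate_succ_apply' (fun w => pvMulVec M w)]
          congr 2
          omega
        · rw [if_neg hodd]
          congr 2
          omega

theorem wf_matPow (e : Nat) : ∀ (R M : List (List Int)), pvWf R → pvWf M →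
    pvWf (pvMatPow R M e) := by
  induction e using Nat.strong_induction_on with
  | _ e IH =>
      intro R M hR hM
      rw [pvMatPow]
      by_cases h0 : e = 0
      · simpa [h0]
      · rw [dif_neg h0]
        refine IH (e / 2) (Nat.div_lt_self (Nat.pos_of_ne_zero h0) one_lt_two) _ _ ?_
          (wf_matMul hM hM)
        split_ifs
        · exact wf_matMul hR hM
        · exact hR

def pvSeedVec (e : Nat) : List Int :=
  [pent (e + 5), pent (e + 6), pent (e + 7), pent (e + 8), pent (e + 9)]

theorem wf_I5 : pvWf pvI5 :=
  ⟨rfl, by intro r hr; simp only [pvI5] at hr; fin_cases hr <;> rfl⟩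
theorem wf_T5 : pvWf pvT5 :=
  ⟨rfl, by intro r hr; simp only [pvT5] at hr; fin_cases hr <;> rfl⟩

theorem mulVec_I5 (v : List Int) (hv : v.length = 5) : pvMulVec pvI5 v = v := by
  obtain ⟨_, _, _, _, _, rfl⟩ := list5 v hv
  simp [pvMulVec, pvI5, pvDot, List.zip]

theorem seed_succ (e : Nat) :
    pvSeedVec (e + 1)
      = [pent (e + 6), pent (e + 7), pent (e + 8), pent (e + 9),
         pent (e + 9) + pent (e + 5)] := by
  have h5 : pent (e + 1 + 9) = pent (e + 9) + pent (e + 5) := by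
    have h : e + 1 + 9 = (e + 5) + 5 := by omega
    rw [h, pent, show e + 5 + 4 = e + 9 from by omega]
  simp only [pvSeedVec]
  rw [show e + 1 + 5 = e + 6 from by omega, show e + 1 + 6 = e + 7 from by omega,
    show e + 1 + 7 = e + 8 from by omega, show e + 1 + 8 = e + 9 from by omega, h5]

theorem mulVec_T5_seed (e : Nat) : pvMulVec pvT5 (pvSeedVec e) = pvSeedVec (e + 1) := by
  rw [seed_succ]
  simp only [pvMulVec, pvT5, pvSeedVec, pvDot, List.map, List.zip, List.zipWith,
    List.sum_cons, List.sum_nil]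
  refine List.ext_getElem (by simp) ?_
  intro i h1 h2
  simp only [List.length_cons, List.length_nil] at h2
  interval_cases i <;> simp <;> ring

theorem iterate_T5_seed (e : Nat) :
    (fun w => pvMulVec pvT5 w)^[e] (pvSeedVec 0) = pvSeedVec e := by
  induction e with
  | zero => rfl
  | succ e ih => rw [Function.iterate_succ_apply', ih, mulVec_T5_seed]

theorem seed_len (e : Nat) : (pvSeedVec e).length = 5 := by simp [pvSeedVec]

-- B's value for N ≥ 10
theorem alt_big (e : Nat) :
    pvDot ((PySem.List.pyGet? (pvMatPow pvI5 pvT5 e) 4).getD []) [2, 3, 4, 5, 7]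
      = pent (e + 9) := by
  have hP : pvWf (pvMatPow pvI5 pvT5 e) := wf_matPow e _ _ wf_I5 wf_T5
  have hact := pow_act e pvI5 pvT5 (pvSeedVec 0) wf_I5 wf_T5 (seed_len 0)
  rw [iterate_T5_seed, mulVec_I5 _ (seed_len e)] at hact
  obtain ⟨r0, r1, r2, r3, r4, hM, _, _, _, _, _⟩ := wf5 hP
  rw [hM] at hact ⊢
  have hseed : pvSeedVec 0 = [2, 3, 4, 5, 7] := by decide
  rw [← hseed]
  simp only [pvMulVec, List.map, pvSeedVec] at hact
  have := congrArg (fun l => l[4]?) hact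
  simpa [PySem.List.pyGet?, PySem.List.pyIdx?] using this

-- ===== VERDICT (by name: the statement is the Claim_ definition above) =====
theorem trigonal_spec : Claim_equal_trigonal := by
  unfold Claim_equal_trigonal
  intro N _ _
  unfold Spec_trigonal
  by_cases hsmall : N ≤ 9
  · simp only [trigonal, trigonal_alt, if_pos hsmall, if_pos (show N < 10 by omega)]
    rw [pyAGet?_toList]
  · simp only [trigonal, trigonal_alt, if_neg hsmall, if_neg (show ¬ N < 10 by omega)]
    set e : Nat := (N - 9).toNat with he
    have hN : N = (9 : Int) + e := by omega
    have hlen : (PySem.List.pyRange 10 (N + 1) 1).length = e := by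
      rw [PySem.List.length_pyRange_one]; omega
    rw [pyAGet?_toList, foldl_arr]
    rw [foldl_const_iterate, hlen]
    have hbase : (#[0, 1, 1, 1, 2, 2, 3, 4, 5, 7] : Array Int).toList
        = (List.range 10).map pent := by decide
    rw [hbase, iterate_stepA e]
    have hidx : PySem.List.pyGet? ((List.range (10 + e)).map pent) N
        = some (pent (e + 9)) := by
      rw [hN, show (9 : Int) + e = ((e + 9 : Nat) : Int) from by push_cast; ring,
        PySem.List.pyGet?_natCast, List.getElem?_map,
        List.getElem?_range (show e + 9 < 10 + e by omega)]
      rfl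
    rw [hidx, alt_big e]
    rfl
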